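-- pv_equiv track=rewrite | github.com/schaffsp/CS412FinalProject | aprox bound.py | iset
-- ===== SOURCE A (Python) =====
-- def iset(g, actions):
--     labeled = 0
--     while labeled < len(g):
--         last = None
--         for v in g:
--             actions += 1
--             last = v
--             if v > labeled:
--                 for edge in range(g[v]):
--                     actions += 1
--         labeled += 1
--         # foor loop through edges
--         for edge in range(g[v]):
--             actions += 1
--     return actions
-- ===== SOURCE B (Python) =====
-- def iset(g, actions):
--     n = len(g)
--     if n == 0:
--         return actions
--     last = list(g)[-1]
--     total = actions + n * n + n * max(0, g[last])
--     for v, e in g.items():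
--         total += max(0, e) * min(max(v, 0), n)
--     return total
-- ===== Notes on version B (the rewrite author's own statement) =====
-- stated objective: faster
-- what changed: Replaced A's nested loops (outer pass per vertex, inner scan over all vertices, and a unary count per edge via range) by a closed-form O(n) formula: actions + n*n + n*max(0,g[last]) + sum over (v,e) of max(0,e)*min(max(v,0),n).
import Mathlib
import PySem

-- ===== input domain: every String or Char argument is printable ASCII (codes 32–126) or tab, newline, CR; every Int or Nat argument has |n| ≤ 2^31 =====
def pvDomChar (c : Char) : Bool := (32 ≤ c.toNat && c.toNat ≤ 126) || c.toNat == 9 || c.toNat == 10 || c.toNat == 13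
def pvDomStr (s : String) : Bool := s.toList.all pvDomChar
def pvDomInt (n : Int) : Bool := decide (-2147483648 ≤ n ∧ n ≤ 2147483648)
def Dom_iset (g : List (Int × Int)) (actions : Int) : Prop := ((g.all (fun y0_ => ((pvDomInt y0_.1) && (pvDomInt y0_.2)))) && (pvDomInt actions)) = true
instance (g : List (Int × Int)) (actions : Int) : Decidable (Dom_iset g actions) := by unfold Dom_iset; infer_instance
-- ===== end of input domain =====

-- B replaces A's nested counting loops by a closed-form O(n) formula (same return value; asymptotically faster).

-- ===== PORT A =====
-- Literal port of A: while labeled < len(g), inner for over the dict's keys, counting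
-- range(g[v]) step by step; the leftover loop variable v after the inner for is the
-- last key (the inner for always runs at least once whenever the while body runs).
def iset (g : List (Int × Int)) (actions : Int) : Int :=
  let d := PySem.Dict.ofList g
  (List.range d.size).foldl
    (fun acc (labeled : Nat) =>
      let acc1 := d.keys.foldl
        (fun a v =>
          let a := a + 1
          if v > (labeled : Int) then
            (PySem.List.pyRange 0 (d.getD v 0) 1).foldl (fun x _ => x + 1) a
          else a) acc
      (PySem.List.pyRange 0 (d.getD d.keys.getLast! 0) 1).foldl (fun x _ => x + 1) acc1)
    actions

-- ===== PORT B =====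
def iset_alt (g : List (Int × Int)) (actions : Int) : Int :=
  let d := PySem.Dict.ofList g
  let n : Int := (d.size : Int)
  if n = 0 then actions
  else
    let last := PySem.List.pyGetD d.keys (-1) 0
    let total := actions + n * n + n * max 0 (d.getD last 0)
    d.items.foldl (fun t p => t + max 0 p.2 * min (max p.1 0) n) total

-- ===== PRECONDITION & SPEC =====
def Spec_iset (g : List (Int × Int)) (actions : Int) (out : Int) : Prop := out = iset_alt g actions
instance (g : List (Int × Int)) (actions : Int) (out : Int) : Decidable (Spec_iset g actions out) := by unfold Spec_iset; infer_instance

-- ===== CLAIM (what is proved, stated in full; the proofs are below) =====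
def Claim_equal_iset : Prop := ∀ (g : List (Int × Int)) (actions : Int), Dom_iset g actions → Spec_iset g actions (iset g actions)

-- ===== LEMMAS AND PROOFS =====

-- counting range(m) one by one adds max(0,m), i.e. m.toNat
lemma pvBump (m a : Int) :
    (PySem.List.pyRange 0 m 1).foldl (fun x _ => x + 1) a = a + (m.toNat : Int) := by
  rw [PySem.List.foldl_add _ (fun _ => (1 : Int)) a]
  simp [PySem.List.length_pyRange_one]

-- A's inner for-loop over the items, as a sum
lemma pvInner (l : List (Int × Int)) (lab acc : Int) :
    l.foldl (fun a p => if p.1 > lab then (a + 1) + (p.2.toNat : Int) else a + 1) acc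
      = acc + (l.length : Int) + (l.map (fun p => if p.1 > lab then (p.2.toNat : Int) else 0)).sum := by
  induction l generalizing acc with
  | nil => simp
  | cons p l ih =>
    simp only [List.foldl_cons, List.map_cons, List.sum_cons, List.length_cons, ih]
    by_cases h : p.1 > lab <;> simp [h] <;> ring

-- summing A's inner sums over labeled = 0 .. n-1 gives B's closed form
lemma pvRangeSum (l : List (Int × Int)) (n : Nat) :
    ((List.range n).map (fun (lab : Nat) =>
        (l.map (fun p => if p.1 > (lab : Int) then (p.2.toNat : Int) else 0)).sum)).sum
      = (l.map (fun p => (p.2.toNat : Int) * min (max p.1 0) (n : Int))).sum := by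
  induction n with
  | zero => simp
  | succ n ih =>
    rw [List.range_succ, List.map_append, List.sum_append]
    have hfun : ∀ p : Int × Int,
        (p.2.toNat : Int) * min (max p.1 0) ((n : Int) + 1)
          = (p.2.toNat : Int) * min (max p.1 0) (n : Int)
            + (if p.1 > (n : Int) then (p.2.toNat : Int) else 0) := by
      intro p
      by_cases h : p.1 > (n : Int)
      · have hm : min (max p.1 0) ((n : Int) + 1) = min (max p.1 0) (n : Int) + 1 := by omega
        rw [hm]; simp [h]; ring
      · have hm : min (max p.1 0) ((n : Int) + 1) = min (max p.1 0) (n : Int) := by omega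
        rw [hm]; simp [h]
    rw [ih]
    simp only [Nat.cast_add, Nat.cast_one]
    simp only [hfun, PySem.List.sum_map_add_int]
    simp

lemma pvGetLastBang {α : Type} [Inhabited α] (l : List α) (h : l ≠ []) :
    l.getLast! = l.getLast h := by
  cases l with
  | nil => exact absurd rfl h
  | cons a as => rfl

-- ===== VERDICT (by name: the statement is the Claim_ definition above) =====
theorem iset_spec : Claim_equal_iset := by
  intro g actions _
  unfold Spec_iset iset iset_alt
  dsimp only
  have hnd : (PySem.Dict.ofList g).keys.Nodup := PySem.Dict.nodup_keys_ofList g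
  set d := PySem.Dict.ofList g with hd
  set l := d.items with hl
  have hkeys : d.keys = l.map Prod.fst := rfl
  have hsize : d.size = l.length := rfl
  set T : Int := ((d.getD d.keys.getLast! 0).toNat : Int) with hT
  -- characterise A's outer loop body
  have hbody : ∀ (acc : Int) (lab : Nat),
      (PySem.List.pyRange 0 (d.getD d.keys.getLast! 0) 1).foldl (fun x _ => x + 1)
        (d.keys.foldl
          (fun a v =>
            if v > (lab : Int) then
              (PySem.List.pyRange 0 (d.getD v 0) 1).foldl (fun x _ => x + 1) (a + 1)
            else a + 1) acc)
      = acc + ((l.length : Int)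
          + (l.map (fun p => if p.1 > (lab : Int) then (p.2.toNat : Int) else 0)).sum + T) := by
    intro acc lab
    rw [hkeys, List.foldl_map]
    rw [PySem.List.foldl_congr_mem _ _
        (fun a p => if p.1 > (lab : Int) then (a + 1) + ((p : Int × Int).2.toNat : Int) else a + 1) acc ?_]
    · rw [pvInner, pvBump, ← hkeys]
      ring
    · intro a p hp
      have hv : d.getD p.1 0 = p.2 :=
        PySem.Dict.getD_of_mem_items d (by simpa using hp) hnd 0
      rw [hv, pvBump]
  -- evaluate A to a closed form
  have hA : (List.range d.size).foldl
      (fun acc (labeled : Nat) =>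
        let acc1 := d.keys.foldl
          (fun a v =>
            let a := a + 1
            if v > (labeled : Int) then
              (PySem.List.pyRange 0 (d.getD v 0) 1).foldl (fun x _ => x + 1) a
            else a) acc
        (PySem.List.pyRange 0 (d.getD d.keys.getLast! 0) 1).foldl (fun x _ => x + 1) acc1)
      actions
      = actions + (l.length : Int) * (l.length : Int) + (l.length : Int) * T
        + (l.map (fun p => (p.2.toNat : Int) * min (max p.1 0) (l.length : Int))).sum := by
    rw [PySem.List.foldl_congr_mem _ _
        (fun acc (lab : Nat) => acc + ((l.length : Int)
          + (l.map (fun p => if p.1 > (lab : Int) then (p.2.toNat : Int) else 0)).sum + T))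
        actions (fun acc lab _ => hbody acc lab)]
    rw [PySem.List.foldl_add]
    simp only [PySem.List.sum_map_add_int, hsize]
    rw [pvRangeSum]
    simp
    ring
  rw [hA]
  by_cases hnil : l = []
  · simp [hsize, hnil]
  · have hlen : (l.length : Int) ≠ 0 := by
      simpa using fun h => hnil (List.length_eq_zero_iff.mp h)
    rw [hsize, if_neg hlen]
    have hkne : d.keys ≠ [] := by
      rw [hkeys]; simpa using hnil
    have hlast : PySem.List.pyGetD d.keys (-1) 0 = d.keys.getLast! := by
      rw [PySem.List.pyGetD_neg_one _ _ hkne, pvGetLastBang _ hkne]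
    rw [hlast]
    rw [PySem.List.foldl_add l
      (fun p => max 0 p.2 * min (max p.1 0) ((l.length : Nat) : Int)) _]
    have hmax : ∀ a : Int, max 0 a = (a.toNat : Int) := by intro a; omega
    simp only [hmax, hT]
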